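-- pv_equiv track=rewrite | github.com/Ria-jay/Bac-Detector | bac_detector/graph/inference.py | _path_up_to_first_placeholder
-- ===== SOURCE A (Python) =====
-- from typing import Optional
--
-- def _path_up_to_first_placeholder(path: str) -> Optional[str]:
--     """Return the path prefix including the first {placeholder} segment."""
--     segments = path.strip("/").split("/")
--     collected: list[str] = []
--     for seg in segments:
--         collected.append(seg)
--         if seg.startswith("{"):
--             return "/" + "/".join(collected)
--     return None
-- ===== SOURCE B (Python) =====
-- from typing import Optional
--
-- def _path_up_to_first_placeholder(path: str) -> Optional[str]:
--     """Return the path prefix including the first {placeholder} segment."""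
--     segments = path.strip("/").split("/")
--     idx = next((i for i, seg in enumerate(segments) if seg.startswith("{")), None)
--     if idx is None:
--         return None
--     return "/" + "/".join(segments[: idx + 1])
-- ===== Notes on version B (the rewrite author's own statement) =====
-- stated objective: simpler
-- what changed: Replaces the incremental accumulator loop with an early return inside it by a separate boundary-finding pass (first index of a segment starting with '{') followed by a single slice-and-join.
import Mathlib
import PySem

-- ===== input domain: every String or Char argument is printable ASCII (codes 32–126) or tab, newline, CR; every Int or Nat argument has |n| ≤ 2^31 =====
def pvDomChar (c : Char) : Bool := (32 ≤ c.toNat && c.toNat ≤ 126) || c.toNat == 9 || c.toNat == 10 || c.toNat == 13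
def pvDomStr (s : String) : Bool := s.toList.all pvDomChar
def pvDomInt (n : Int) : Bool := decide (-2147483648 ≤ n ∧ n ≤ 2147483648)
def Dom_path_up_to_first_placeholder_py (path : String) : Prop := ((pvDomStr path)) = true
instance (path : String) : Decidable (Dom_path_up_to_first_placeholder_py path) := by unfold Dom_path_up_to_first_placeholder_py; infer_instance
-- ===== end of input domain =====

-- B replaces A's accumulator loop (append + early return) by a boundary-finding pass followed by one slice-and-join; objective: simpler.

-- exact port of Python's "/" + "/".join(parts) (code-point concatenation, then back to String)
def pvSlashJoin (parts : List (List Char)) : String :=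
  String.ofList ('/' :: PySem.Chars.join "/".toList parts)

-- ===== PORT A =====
-- the for-loop over segments with the growing `collected` accumulator
def pvLoopA : List (List Char) → List (List Char) → Option String
  | [], _ => none
  | seg :: rest, collected =>
      let collected' := collected ++ [seg]
      if PySem.Chars.startswith seg ['{'] then some (pvSlashJoin collected')
      else pvLoopA rest collected'

def path_up_to_first_placeholder_py (path : String) : Option String :=
  let segments := PySem.Chars.splitOn (PySem.Chars.stripChars path.toList "/".toList) "/".toList
  pvLoopA segments []

-- ===== PORT B =====
def path_up_to_first_placeholder_py_alt (path : String) : Option String :=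
  let segments := PySem.Chars.splitOn (PySem.Chars.stripChars path.toList "/".toList) "/".toList
  match segments.findIdx? (fun seg => PySem.Chars.startswith seg ['{']) with
  | none => none
  | some i => some (pvSlashJoin (segments.take (i + 1)))

-- ===== PRECONDITION & SPEC =====
def Spec_path_up_to_first_placeholder_py (path : String) (out : Option String) : Prop := out = path_up_to_first_placeholder_py_alt path
instance (path : String) (out : Option String) : Decidable (Spec_path_up_to_first_placeholder_py path out) := by unfold Spec_path_up_to_first_placeholder_py; infer_instance

-- ===== CLAIM (what is proved, stated in full; the proofs are below) =====
def Claim_equal_path_up_to_first_placeholder_py : Prop := ∀ (path : String), Dom_path_up_to_first_placeholder_py path → Spec_path_up_to_first_placeholder_py path (path_up_to_first_placeholder_py path)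

-- ===== LEMMAS AND PROOFS =====

theorem pvLoopA_eq (segs : List (List Char)) (collected : List (List Char)) :
    pvLoopA segs collected =
      match segs.findIdx? (fun seg => PySem.Chars.startswith seg ['{']) with
      | none => none
      | some i => some (pvSlashJoin (collected ++ segs.take (i + 1))) := by
  induction segs generalizing collected with
  | nil => simp [pvLoopA]
  | cons seg rest ih =>
      simp only [pvLoopA, List.findIdx?_cons]
      by_cases h : PySem.Chars.startswith seg ['{'] = true
      · simp [h]
      · simp only [h, if_false, cond_false]
        rw [ih (collected ++ [seg])]
        cases hf : rest.findIdx? (fun seg => PySem.Chars.startswith seg ['{']) with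
        | none => simp
        | some i => simp [List.take_succ_cons]

-- ===== VERDICT (by name: the statement is the Claim_ definition above) =====
theorem path_up_to_first_placeholder_py_spec : Claim_equal_path_up_to_first_placeholder_py := by
  intro path _
  unfold Spec_path_up_to_first_placeholder_py path_up_to_first_placeholder_py path_up_to_first_placeholder_py_alt
  simp only [pvLoopA_eq, List.nil_append]
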